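-- pv_equiv track=rewrite | github.com/JoshYadav/-DepSentinel | backend/osv_client.py | get_severity_score
-- ===== SOURCE A (Python) =====
-- def get_severity_score(osv_results):
--     """Returns the highest severity found."""
--     if not osv_results:
--         return "NONE"
--
--     severities = [v.get("severity", "LOW") for v in osv_results]
--
--     if "CRITICAL" in severities: return "CRITICAL"
--     if "HIGH" in severities: return "HIGH"
--     if "MEDIUM" in severities: return "MEDIUM"
--     if "LOW" in severities: return "LOW"
--
--     return "UNKNOWN"
-- ===== SOURCE B (Python) =====
-- _RANK = {"CRITICAL": 4, "HIGH": 3, "MEDIUM": 2, "LOW": 1}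
-- _LABEL = ["UNKNOWN", "LOW", "MEDIUM", "HIGH", "CRITICAL"]
--
-- def get_severity_score(osv_results):
--     """Returns the highest severity found."""
--     if not osv_results:
--         return "NONE"
--     best = 0
--     for v in osv_results:
--         r = _RANK.get(v.get("severity", "LOW"), 0)
--         if r > best:
--             best = r
--     return _LABEL[best]
-- ===== Notes on version B (the rewrite author's own statement) =====
-- stated objective: alternative
-- what changed: Replaces the intermediate severities list plus up-to-four separate membership scans with a single pass that keeps a running maximum severity rank and maps it back to a label at the end.
import Mathlib
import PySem

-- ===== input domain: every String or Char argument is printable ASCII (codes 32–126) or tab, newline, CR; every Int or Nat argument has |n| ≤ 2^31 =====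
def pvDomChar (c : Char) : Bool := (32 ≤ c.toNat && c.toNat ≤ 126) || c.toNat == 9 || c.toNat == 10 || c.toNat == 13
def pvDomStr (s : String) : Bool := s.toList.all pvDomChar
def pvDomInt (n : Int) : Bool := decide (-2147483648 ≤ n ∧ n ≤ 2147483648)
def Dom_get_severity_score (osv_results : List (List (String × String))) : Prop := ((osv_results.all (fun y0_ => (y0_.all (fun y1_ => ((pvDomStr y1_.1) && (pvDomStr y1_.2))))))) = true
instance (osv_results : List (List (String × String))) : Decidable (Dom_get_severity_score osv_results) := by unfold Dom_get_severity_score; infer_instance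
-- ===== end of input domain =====

-- B replaces the intermediate list plus up-to-four membership scans with a single pass
-- keeping a running maximum rank; same results, single traversal.

-- ===== PORT A =====
-- v.get("severity", "LOW"): first-match association-list lookup (used by both ports)
def pvGetSev (v : List (String × String)) : String :=
  PySem.Dict.getD (PySem.Dict.mk v) "severity" "LOW"

def get_severity_score (osv_results : List (List (String × String))) : String :=
  if osv_results = [] then "NONE"
  else
    let severities := osv_results.map (fun v => pvGetSev v)
    if "CRITICAL" ∈ severities then "CRITICAL"
    else if "HIGH" ∈ severities then "HIGH"
    else if "MEDIUM" ∈ severities then "MEDIUM"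
    else if "LOW" ∈ severities then "LOW"
    else "UNKNOWN"

-- ===== PORT B =====
-- _RANK.get(s, 0): lookup in the constant rank dict
def pvRank (s : String) : Nat :=
  if s = "CRITICAL" then 4
  else if s = "HIGH" then 3
  else if s = "MEDIUM" then 2
  else if s = "LOW" then 1
  else 0

def pvLabel : List String := ["UNKNOWN", "LOW", "MEDIUM", "HIGH", "CRITICAL"]

def get_severity_score_alt (osv_results : List (List (String × String))) : String :=
  if osv_results = [] then "NONE"
  else
    let best := osv_results.foldl
      (fun best v => let r := pvRank (pvGetSev v); if r > best then r else best) 0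
    -- _LABEL[best]: best is always in [0,4], so plain getD is exact here
    pvLabel.getD best "UNKNOWN"

-- ===== PRECONDITION & SPEC =====
def Spec_get_severity_score (osv_results : List (List (String × String))) (out : String) : Prop := out = get_severity_score_alt osv_results
instance (osv_results : List (List (String × String))) (out : String) : Decidable (Spec_get_severity_score osv_results out) := by unfold Spec_get_severity_score; infer_instance

-- ===== CLAIM (what is proved, stated in full; the proofs are below) =====
def Claim_equal_get_severity_score : Prop := ∀ (osv_results : List (List (String × String))), Dom_get_severity_score osv_results → Spec_get_severity_score osv_results (get_severity_score osv_results)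

-- ===== LEMMAS AND PROOFS =====

-- A's membership chain expressed as the best rank it selects
def pvChain (sevs : List String) : Nat :=
  if "CRITICAL" ∈ sevs then 4
  else if "HIGH" ∈ sevs then 3
  else if "MEDIUM" ∈ sevs then 2
  else if "LOW" ∈ sevs then 1
  else 0

theorem pvStep_eq_max (b r : Nat) : (if r > b then r else b) = max b r := by split <;> omega

theorem pvFold_shift (l : List (List (String × String))) (b : Nat) :
    l.foldl (fun best v => let r := pvRank (pvGetSev v); if r > best then r else best) b
      = max b (l.foldl (fun best v => let r := pvRank (pvGetSev v); if r > best then r else best) 0) := by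
  induction l generalizing b with
  | nil => simp [List.foldl]
  | cons v l ih =>
    simp only [List.foldl]
    rw [ih, ih (if pvRank (pvGetSev v) > 0 then pvRank (pvGetSev v) else 0)]
    simp only [pvStep_eq_max]
    omega

theorem pvChain_cons (s : String) (sevs : List String) :
    pvChain (s :: sevs) = max (pvRank s) (pvChain sevs) := by
  unfold pvChain pvRank
  simp only [List.mem_cons]
  split_ifs <;> simp_all

theorem pvFold_eq_chain (l : List (List (String × String))) :
    l.foldl (fun best v => let r := pvRank (pvGetSev v); if r > best then r else best) 0
      = pvChain (l.map (fun v => pvGetSev v)) := by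
  induction l with
  | nil => simp [List.foldl, pvChain]
  | cons v l ih =>
    simp only [List.foldl, List.map]
    rw [pvFold_shift, ih, pvChain_cons, pvStep_eq_max]
    omega

theorem pvChain_le (sevs : List String) : pvChain sevs ≤ 4 := by
  unfold pvChain; split_ifs <;> omega

-- ===== VERDICT (by name: the statement is the Claim_ definition above) =====
theorem get_severity_score_spec : Claim_equal_get_severity_score := by
  intro l _
  unfold Spec_get_severity_score get_severity_score get_severity_score_alt
  by_cases he : l = []
  · simp [he]
  · simp only [he, ite_false]
    rw [pvFold_eq_chain]
    have hle := pvChain_le (l.map (fun v => pvGetSev v))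
    unfold pvChain at *
    split_ifs <;> simp [pvLabel]
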